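-- pv_equiv track=rewrite | github.com/smturtle2/cr-project | main.py | normalize_example_splits
-- ===== SOURCE A (Python) =====
-- from collections.abc import Callable, Mapping, Sequence
--
-- EXAMPLE_SPLITS = ("train", "validation", "test")
--
-- def normalize_example_splits(example_splits: Sequence[str] | str | None) -> list[str]:
--     if example_splits is None:
--         requested_splits = ["test"]
--     elif isinstance(example_splits, str):
--         requested_splits = [example_splits]
--     else:
--         requested_splits = list(example_splits)
--
--     normalized: list[str] = []
--     seen: set[str] = set()
--     invalid: list[str] = []
--     for split in requested_splits:
--         if split not in EXAMPLE_SPLITS: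
--             invalid.append(str(split))
--             continue
--         if split in seen:
--             continue
--         seen.add(split)
--         normalized.append(split)
--
--     if invalid:
--         supported = ", ".join(EXAMPLE_SPLITS)
--         invalid_text = ", ".join(invalid)
--         raise ValueError(f"example_splits must contain only {supported}; got: {invalid_text}")
--
--     return normalized
-- ===== SOURCE B (Python) =====
-- EXAMPLE_SPLITS = ("train", "validation", "test")
--
-- def normalize_example_splits(example_splits):
--     if example_splits is None:
--         requested_splits = ["test"]
--     elif isinstance(example_splits, str):
--         requested_splits = [example_splits]
--     else:
--         requested_splits = list(example_splits)
--
--     invalid = [str(s) for s in requested_splits if s not in EXAMPLE_SPLITS]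
--     if invalid:
--         supported = ", ".join(EXAMPLE_SPLITS)
--         invalid_text = ", ".join(invalid)
--         raise ValueError(f"example_splits must contain only {supported}; got: {invalid_text}")
--
--     # ordered dedup, computed the other way round: sort the canonical names that occur
--     # by their first-occurrence position in the request
--     present = [name for name in EXAMPLE_SPLITS if name in requested_splits]
--     return sorted(present, key=requested_splits.index)
-- ===== Notes on version B (the rewrite author's own statement) =====
-- stated objective: alternative
-- what changed: Instead of scanning the request with a seen-set to dedup, B validates via an invalid-list comprehension and then produces the result from the other side: it takes the canonical names of EXAMPLE_SPLITS that occur in the request and sorts them by their first-occurrence index (requested_splits.index), which equals the first-occurrence-ordered dedup.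
import Mathlib
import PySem

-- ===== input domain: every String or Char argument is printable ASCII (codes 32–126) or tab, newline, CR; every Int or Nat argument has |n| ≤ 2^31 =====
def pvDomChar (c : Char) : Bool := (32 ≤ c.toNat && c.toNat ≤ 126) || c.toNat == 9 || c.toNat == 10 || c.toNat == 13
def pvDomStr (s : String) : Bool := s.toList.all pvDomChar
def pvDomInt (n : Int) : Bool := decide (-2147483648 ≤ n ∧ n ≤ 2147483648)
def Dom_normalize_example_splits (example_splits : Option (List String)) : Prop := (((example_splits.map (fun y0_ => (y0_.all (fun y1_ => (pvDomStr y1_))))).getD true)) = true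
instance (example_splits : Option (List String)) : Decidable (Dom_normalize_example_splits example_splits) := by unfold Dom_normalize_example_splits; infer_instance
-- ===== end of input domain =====

-- B validates with an invalid-list pass, then builds the result by sorting the canonical names
-- present in the request by their first-occurrence index — an alternative to A's seen-set scan;
-- same return value wherever A returns (Pre_ excludes the ValueError-raising inputs).


def EXAMPLE_SPLITS : List String := ["train", "validation", "test"]

-- ===== PORT A =====
-- A's single loop over requested_splits keeping (normalized, seen, invalid); the raise is
-- modelled by returning [] when invalid is non-empty (those inputs are excluded by Pre_).
def normalize_example_splits (example_splits : Option (List String)) : List String :=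
  let requested_splits :=
    match example_splits with
    | none => ["test"]
    | some xs => xs
  let st : List String × PySem.Set String × List String :=
    requested_splits.foldl
      (fun st split =>
        if ¬ (EXAMPLE_SPLITS.contains split) then (st.1, st.2.1, st.2.2 ++ [split])
        else if st.2.1.contains split then st
        else (st.1 ++ [split], PySem.Set.add st.2.1 split, st.2.2))
      ([], PySem.Set.empty, [])
  if st.2.2 ≠ [] then []  -- raise ValueError: outside Pre_
  else st.1

-- ===== PORT B =====
-- B: invalid-list comprehension, then sort the canonical names present in the request by their
-- first-occurrence index.  requested_splits.index(s) is index?; it is some here since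
-- `present` only holds members of requested_splits, so `.getD 0` is exact.
def normalize_example_splits_alt (example_splits : Option (List String)) : List String :=
  let requested_splits :=
    match example_splits with
    | none => ["test"]
    | some xs => xs
  let invalid := requested_splits.filter (fun s => !(EXAMPLE_SPLITS.contains s))
  if invalid ≠ [] then []  -- raise ValueError: outside Pre_
  else
    let present := EXAMPLE_SPLITS.filter (fun name => requested_splits.contains name)
    PySem.List.sorted present (fun s => (PySem.List.index? requested_splits s).getD 0)

-- ===== PRECONDITION & SPEC =====
-- Pre_ excludes exactly the inputs on which A (and B) raise ValueError: some requested split invalid.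
def Pre_normalize_example_splits (example_splits : Option (List String)) : Prop :=
  match example_splits with
  | none => True
  | some xs => ∀ s ∈ xs, s ∈ EXAMPLE_SPLITS

instance (example_splits : Option (List String)) : Decidable (Pre_normalize_example_splits example_splits) := by
  unfold Pre_normalize_example_splits
  cases example_splits <;> infer_instance

def pvWitness_normalize_example_splits : Option (List String) := some ["test", "train", "test"]

def Spec_normalize_example_splits (example_splits : Option (List String)) (out : List String) : Prop := out = normalize_example_splits_alt example_splits
instance (example_splits : Option (List String)) (out : List String) : Decidable (Spec_normalize_example_splits example_splits out) := by unfold Spec_normalize_example_splits; infer_instance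

-- ===== CLAIM (what is proved, stated in full; the proofs are below) =====
def Claim_equal_normalize_example_splits : Prop := ∀ (example_splits : Option (List String)), Dom_normalize_example_splits example_splits → Pre_normalize_example_splits example_splits → Spec_normalize_example_splits example_splits (normalize_example_splits example_splits)

-- ===== LEMMAS AND PROOFS =====

-- On all-valid input, A's loop with seen = normalized (as lists) just inserts into a Set.
theorem aLoop_valid (xs : List String) (h : ∀ s ∈ xs, s ∈ EXAMPLE_SPLITS)
    (norm : PySem.Set String) (inv : List String) :
    xs.foldl
      (fun (st : List String × PySem.Set String × List String) split =>
        if ¬ (EXAMPLE_SPLITS.contains split) then (st.1, st.2.1, st.2.2 ++ [split])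
        else if st.2.1.contains split then st
        else (st.1 ++ [split], PySem.Set.add st.2.1 split, st.2.2))
      (norm, norm, inv)
      = (PySem.Set.update norm xs, PySem.Set.update norm xs, inv) := by
  induction xs generalizing norm with
  | nil => simp [PySem.Set.update]
  | cons s rest ih =>
    have hrest : ∀ t ∈ rest, t ∈ EXAMPLE_SPLITS := fun t ht => h t (by simp [ht])
    rw [List.foldl_cons, if_neg (by simpa using h s (by simp)), PySem.Set.update_cons]
    by_cases hmem : s ∈ norm
    · rw [if_pos (by simpa using (PySem.Set.contains_iff (s := norm) (x := s)).2 hmem),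
        PySem.Set.add_of_mem hmem]
      exact ih hrest norm
    · rw [if_neg (by simp [PySem.Set.contains_eq_listContains, hmem])]
      show List.foldl _ (norm ++ [s], PySem.Set.add norm s, inv) rest = _
      rw [PySem.Set.add_of_not_mem hmem]
      exact ih hrest (norm ++ [s])

-- set(xs)'s order IS first-occurrence order: the first-index key is strictly increasing along it.
theorem ofList_pairwise_firstIdx (xs : List String) :
    (PySem.Set.ofList xs).Pairwise
      (fun a b => (PySem.List.index? xs a).getD 0 < (PySem.List.index? xs b).getD 0) := by
  induction xs with
  | nil => simp [PySem.Set.ofList_nil]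
  | cons x xs ih =>
    rw [PySem.Set.ofList_cons]
    refine List.Pairwise.cons ?_ ?_
    · intro b hb
      obtain ⟨hbs, hbx⟩ := (PySem.Set.mem_discard _ _ _).1 hb
      have hbxs : b ∈ xs := (PySem.Set.mem_ofList _ _).1 hbs
      obtain ⟨k, hk⟩ := Option.isSome_iff_exists.1 ((PySem.List.index?_isSome_iff xs b).2 hbxs)
      rw [PySem.List.index?_cons_self, PySem.List.index?_cons_of_ne xs (fun e => hbx e.symm), hk]
      simp
    · have hfilt : List.Pairwise
          (fun a b => (PySem.List.index? xs a).getD 0 < (PySem.List.index? xs b).getD 0)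
          ((PySem.Set.ofList xs).discard x) :=
        List.Pairwise.filter _ ih
      refine hfilt.imp_of_mem ?_
      intro a b ha hb hlt
      obtain ⟨has, hax⟩ := (PySem.Set.mem_discard _ _ _).1 ha
      obtain ⟨hbs, hbx⟩ := (PySem.Set.mem_discard _ _ _).1 hb
      obtain ⟨ka, hka⟩ := Option.isSome_iff_exists.1
        ((PySem.List.index?_isSome_iff xs a).2 ((PySem.Set.mem_ofList _ _).1 has))
      obtain ⟨kb, hkb⟩ := Option.isSome_iff_exists.1
        ((PySem.List.index?_isSome_iff xs b).2 ((PySem.Set.mem_ofList _ _).1 hbs))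
      rw [PySem.List.index?_cons_of_ne xs (fun e => hax e.symm),
        PySem.List.index?_cons_of_ne xs (fun e => hbx e.symm), hka, hkb]
      rw [hka, hkb] at hlt
      simpa using Nat.add_lt_add_right hlt 1

theorem valid_core (xs : List String) (h : ∀ s ∈ xs, s ∈ EXAMPLE_SPLITS) :
    normalize_example_splits (some xs) = normalize_example_splits_alt (some xs) := by
  unfold normalize_example_splits normalize_example_splits_alt
  simp only
  have hfilter : xs.filter (fun s => !(EXAMPLE_SPLITS.contains s)) = [] := by
    rw [List.filter_eq_nil_iff]
    intro a ha
    simp [h a ha]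
  have h0 : (PySem.Set.empty : PySem.Set String) = [] := rfl
  rw [h0, aLoop_valid xs h [] [], hfilter]
  simp only [ne_eq, not_true, if_false]
  have hupd : PySem.Set.update ([] : PySem.Set String) xs = PySem.Set.ofList xs := rfl
  rw [hupd]
  refine (PySem.List.sorted_eq_of_perm_of_pairwise_lt _ _ _ ?_ (ofList_pairwise_firstIdx xs)).symm
  rw [List.perm_ext_iff_of_nodup (PySem.Set.nodup_ofList xs)
    (List.Nodup.filter _ (by decide : (EXAMPLE_SPLITS).Nodup))]
  intro a
  simp only [PySem.Set.mem_ofList, List.mem_filter, List.contains_iff_mem]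
  exact ⟨fun ha => ⟨h a ha, ha⟩, fun ⟨_, ha⟩ => ha⟩

-- ===== VERDICT (by name: the statement is the Claim_ definition above) =====
theorem normalize_example_splits_spec : Claim_equal_normalize_example_splits := by
  intro example_splits _ hpre
  unfold Spec_normalize_example_splits
  cases example_splits with
  | none => decide
  | some xs => exact valid_core xs hpre
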